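-- pv_equiv track=rewrite | github.com/LukasJSvedberg/Rubix_Project_Repository | Board.py | dice_combinations_4
-- ===== SOURCE A (Python) =====
-- def dice_combinations_4(k, move_bucket):
--     memo = {}
--     if k == 1:
--         memo[1] = [(i,) for i in move_bucket]
--         return memo[1]
--
--     elif k in memo:
--         return memo[k]
--
--     else:
--         prev_res = dice_combinations_4(k - 1, move_bucket)
--         res = []
--
--         for comb in prev_res:
--             for j in range(len(move_bucket)):
--                 if move_bucket[j][0] != comb[-1][0]:
--                     res.append(comb + (move_bucket[j],))
--
--         memo[k] = res
--         return res
-- ===== SOURCE B (Python) =====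
-- def dice_combinations_4(k, move_bucket):
--     res = [(m,) for m in move_bucket]
--     for _ in range(k - 1):
--         res = [comb + (m,)
--                for comb in res
--                for m in move_bucket
--                if m[0] != comb[-1][0]]
--     return res
-- ===== Notes on version B (the rewrite author's own statement) =====
-- stated objective: simpler
-- what changed: Replaces A's top-down recursion (with a uselessly re-created per-call memo dict and an index loop over range(len(move_bucket))) by a bottom-up loop that rebuilds the sequence list k-1 times with a single flat comprehension iterating the bucket directly.
import Mathlib
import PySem

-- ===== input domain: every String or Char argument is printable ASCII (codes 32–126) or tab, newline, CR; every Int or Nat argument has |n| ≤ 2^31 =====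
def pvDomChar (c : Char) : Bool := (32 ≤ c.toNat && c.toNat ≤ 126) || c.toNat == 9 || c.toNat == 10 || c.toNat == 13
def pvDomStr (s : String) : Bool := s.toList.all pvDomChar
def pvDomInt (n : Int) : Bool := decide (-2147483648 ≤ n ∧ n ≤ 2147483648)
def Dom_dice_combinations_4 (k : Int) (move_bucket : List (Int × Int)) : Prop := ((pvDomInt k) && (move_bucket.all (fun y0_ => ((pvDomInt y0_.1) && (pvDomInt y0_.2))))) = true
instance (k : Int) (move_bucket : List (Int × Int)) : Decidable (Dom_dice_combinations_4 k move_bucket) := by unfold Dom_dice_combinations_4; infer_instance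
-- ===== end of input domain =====

-- ===== PORT A =====
-- B replaces A's top-down recursion by a bottom-up rebuild loop (objective: simpler).
-- Port of A. Python A's per-call `memo` is a freshly created empty dict, so the
-- `elif k in memo` branch tests membership in an empty dict; ported literally below.
-- For k <= 0 Python A recurses forever (RecursionError); that branch returns [] here
-- and is excluded by Pre_dice_combinations_4.
def dice_combinations_4 (k : Int) (move_bucket : List (Int × Int)) : List (List (Int × Int)) :=
  let memo : PySem.Dict Int (List (List (Int × Int))) := PySem.Dict.empty
  if k = 1 then
    let memo := memo.insert 1 (move_bucket.map (fun i => [i]))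
    memo.getD 1 []
  else if (memo.get? k).isSome then
    memo.getD k []
  else if k ≤ 0 then []  -- Python: unbounded recursion (RecursionError); outside Pre_
  else
    let prev_res := dice_combinations_4 (k - 1) move_bucket
    let res : List (List (Int × Int)) :=
      prev_res.foldl (fun res comb =>
        (PySem.List.pyRange 0 (PySem.List.len move_bucket)).foldl (fun res j =>
          if (PySem.List.pyGetD move_bucket j (0, 0)).1 ≠ (PySem.List.pyGetD comb (-1) (0, 0)).1 then
            res ++ [comb ++ [PySem.List.pyGetD move_bucket j (0, 0)]]
          else res) res) []
    res
termination_by k.toNat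
decreasing_by simp at *; omega

-- ===== PORT B =====
-- Port of B (Source B): bottom-up loop; comb[-1] via pyGetD (comb is never empty: it
-- starts as a 1-element list and only grows).
def dice_combinations_4_alt (k : Int) (move_bucket : List (Int × Int)) : List (List (Int × Int)) :=
  let base := move_bucket.map (fun m => [m])
  (PySem.List.pyRange 0 (k - 1)).foldl
    (fun res _ =>
      res.flatMap (fun comb =>
        (move_bucket.filter (fun m => m.1 ≠ (PySem.List.pyGetD comb (-1) (0, 0)).1)).map
          (fun m => comb ++ [m])))
    base

-- ===== PRECONDITION & SPEC =====
-- Pre_ excludes k ≤ 0, on which Python A recurses without a base case and raises RecursionError.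
def Pre_dice_combinations_4 (k : Int) (move_bucket : List (Int × Int)) : Prop := 1 ≤ k
instance (k : Int) (move_bucket : List (Int × Int)) : Decidable (Pre_dice_combinations_4 k move_bucket) := by unfold Pre_dice_combinations_4; infer_instance
def pvWitness_dice_combinations_4 : Int × (List (Int × Int)) := (3, [(1, 2), (2, 3), (1, 5)])


def Spec_dice_combinations_4 (k : Int) (move_bucket : List (Int × Int)) (out : List (List (Int × Int))) : Prop := out = dice_combinations_4_alt k move_bucket
instance (k : Int) (move_bucket : List (Int × Int)) (out : List (List (Int × Int))) : Decidable (Spec_dice_combinations_4 k move_bucket out) := by unfold Spec_dice_combinations_4; infer_instance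

-- ===== CLAIM (what is proved, stated in full; the proofs are below) =====
def Claim_equal_dice_combinations_4 : Prop := ∀ (k : Int) (move_bucket : List (Int × Int)), Dom_dice_combinations_4 k move_bucket → Pre_dice_combinations_4 k move_bucket → Spec_dice_combinations_4 k move_bucket (dice_combinations_4 k move_bucket)

-- ===== LEMMAS AND PROOFS =====

-- the extension step both programs perform, in B's (flatMap) form
def pvStep (move_bucket : List (Int × Int)) (res : List (List (Int × Int))) : List (List (Int × Int)) :=
  res.flatMap (fun comb =>
    (move_bucket.filter (fun m => m.1 ≠ (PySem.List.pyGetD comb (-1) (0, 0)).1)).map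
      (fun m => comb ++ [m]))

-- A's nested loops compute exactly pvStep
theorem stepA_eq_pvStep (move_bucket : List (Int × Int)) (prev : List (List (Int × Int))) :
    prev.foldl (fun res comb =>
      (PySem.List.pyRange 0 (PySem.List.len move_bucket)).foldl (fun res j =>
        if (PySem.List.pyGetD move_bucket j (0, 0)).1 ≠ (PySem.List.pyGetD comb (-1) (0, 0)).1 then
          res ++ [comb ++ [PySem.List.pyGetD move_bucket j (0, 0)]]
        else res) res) [] = pvStep move_bucket prev := by
  have hinner : ∀ (comb : List (Int × Int)) (acc : List (List (Int × Int))),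
      (PySem.List.pyRange 0 (PySem.List.len move_bucket)).foldl (fun res j =>
        if (PySem.List.pyGetD move_bucket j (0, 0)).1 ≠ (PySem.List.pyGetD comb (-1) (0, 0)).1 then
          res ++ [comb ++ [PySem.List.pyGetD move_bucket j (0, 0)]]
        else res) acc =
      acc ++ (move_bucket.filter (fun m => m.1 ≠ (PySem.List.pyGetD comb (-1) (0, 0)).1)).map
        (fun m => comb ++ [m]) := by
    intro comb acc
    rw [PySem.List.foldl_pyRange_pyGetD move_bucket (0, 0)
      (fun res m => if m.1 ≠ (PySem.List.pyGetD comb (-1) (0, 0)).1 then res ++ [comb ++ [m]] else res)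
      acc le_rfl]
    simpa using PySem.List.foldl_append_if
      (fun m => decide (m.1 ≠ (PySem.List.pyGetD comb (-1) (0, 0)).1))
      (fun m => comb ++ [m]) move_bucket acc
  calc prev.foldl (fun res comb =>
        (PySem.List.pyRange 0 (PySem.List.len move_bucket)).foldl (fun res j =>
          if (PySem.List.pyGetD move_bucket j (0, 0)).1 ≠ (PySem.List.pyGetD comb (-1) (0, 0)).1 then
            res ++ [comb ++ [PySem.List.pyGetD move_bucket j (0, 0)]]
          else res) res) []
      = prev.foldl (fun res comb =>
          res ++ (move_bucket.filter (fun m => m.1 ≠ (PySem.List.pyGetD comb (-1) (0, 0)).1)).map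
            (fun m => comb ++ [m])) [] := by
        exact PySem.List.foldl_congr_mem prev _ _ []
          (fun acc comb _ => hinner comb acc)
    _ = pvStep move_bucket prev := by
        simpa [pvStep] using PySem.List.foldl_append_eq_flatMap
          (fun comb => (move_bucket.filter (fun m => m.1 ≠ (PySem.List.pyGetD comb (-1) (0, 0)).1)).map
            (fun m => comb ++ [m])) prev []

-- B unfolds one step at the top end of its range
theorem alt_succ (k : Int) (move_bucket : List (Int × Int)) (hk : 2 ≤ k) :
    dice_combinations_4_alt k move_bucket = pvStep move_bucket (dice_combinations_4_alt (k - 1) move_bucket) := by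
  unfold dice_combinations_4_alt
  have h : PySem.List.pyRange 0 (k - 1) = PySem.List.pyRange 0 (k - 1 - 1) ++ [k - 1 - 1] := by
    have := PySem.List.pyRange_one_succ_right (a := 0) (b := k - 1 - 1) (by omega)
    simpa [show k - 1 - 1 + 1 = k - 1 by ring] using this
  rw [h, List.foldl_append]
  simp [pvStep]

theorem main_eq (k : Int) (move_bucket : List (Int × Int)) (hk : 1 ≤ k) :
    dice_combinations_4 k move_bucket = dice_combinations_4_alt k move_bucket := by
  have hn : ∀ (n : Nat) (k : Int), k.toNat = n → 1 ≤ k →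
      dice_combinations_4 k move_bucket = dice_combinations_4_alt k move_bucket := by
    intro n
    induction n with
    | zero => intro k hkn hk1; omega
    | succ m ih =>
      intro k hkn hk1
      by_cases h1 : k = 1
      · subst h1
        unfold dice_combinations_4 dice_combinations_4_alt
        simp [PySem.Dict.empty, PySem.Dict.insert, PySem.Dict.getD, PySem.Dict.get?, PySem.List.pyRange]
      · have hk2 : 2 ≤ k := by omega
        have hA : dice_combinations_4 k move_bucket
            = pvStep move_bucket (dice_combinations_4 (k - 1) move_bucket) := by
          rw [dice_combinations_4]
          simp only [if_neg h1, PySem.Dict.get?, if_neg (by omega : ¬ k ≤ 0)]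
          simpa using stepA_eq_pvStep move_bucket (dice_combinations_4 (k - 1) move_bucket)
        rw [hA, ih (k - 1) (by omega) (by omega), alt_succ k move_bucket hk2]
  exact hn k.toNat k rfl hk

-- ===== VERDICT (by name: the statement is the Claim_ definition above) =====
theorem dice_combinations_4_spec : Claim_equal_dice_combinations_4 := by
  intro k move_bucket _ hpre
  unfold Spec_dice_combinations_4
  exact main_eq k move_bucket hpre
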